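-- pv_equiv track=rewrite | github.com/harshsri1602/KnowForge | nlp/entity/cleaner.py | clean_entities
-- ===== SOURCE A (Python) =====
-- def clean_entities(entities):
--     """
--     Clean and normalize entities:
--     - remove duplicates
--     - remove generic words
--     - merge similar entities
--     """
--
--     cleaned = {}
--
--     for e in entities:
--         text = e["text"]
--
--         if text.lower() in ["service", "system"]:
--             continue
--
--         normalized = text.lower().strip()
--
--         # prefer longer version (Lambda service > Lambda)
--         if normalized in cleaned:
--             if len(text) > len(cleaned[normalized]["text"]):
--                 cleaned[normalized] = e
--         else:
--             cleaned[normalized] = e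
--
--     return list(cleaned.values())
-- ===== SOURCE B (Python) =====
-- def clean_entities(entities):
--     groups = {}
--     for e in entities:
--         low = e["text"].lower()
--         if low in ("service", "system"):
--             continue
--         groups.setdefault(low.strip(), []).append(e)
--     return [max(g, key=lambda e: len(e["text"])) for g in groups.values()]
-- ===== Notes on version B (the rewrite author's own statement) =====
-- stated objective: alternative
-- what changed: Instead of keeping one running best entity per normalized key with an in-loop length comparison, B groups surviving entities into a dict of lists (setdefault/append) and then picks max(group, key=len(text)) per group in a second pass; first-wins max matches A's strict '>' tie-breaking.
import Mathlib
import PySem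

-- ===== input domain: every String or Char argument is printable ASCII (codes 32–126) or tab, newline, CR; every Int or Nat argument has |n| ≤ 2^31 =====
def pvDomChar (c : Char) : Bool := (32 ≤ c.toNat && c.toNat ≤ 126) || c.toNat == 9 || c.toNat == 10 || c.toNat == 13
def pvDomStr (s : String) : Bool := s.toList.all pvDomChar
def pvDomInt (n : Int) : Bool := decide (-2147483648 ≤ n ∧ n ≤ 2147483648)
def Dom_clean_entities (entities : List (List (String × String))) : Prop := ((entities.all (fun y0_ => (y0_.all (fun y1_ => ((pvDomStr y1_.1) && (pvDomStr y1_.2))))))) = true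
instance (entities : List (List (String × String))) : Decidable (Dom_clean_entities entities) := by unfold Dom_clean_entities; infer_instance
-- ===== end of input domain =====

-- B replaces A's running per-key best entity (in-loop length comparison) by a dict of groups built with
-- setdefault/append and a second pass picking max(group, key=len(text)); objective: alternative decomposition.

-- e["text"]: first-match lookup in the entity's association list; exact under Pre_ (the "text" key is present)
def entText (e : List (String × String)) : String :=
  ((PySem.Dict.mk e).get? "text").getD ""

-- ===== PORT A =====
def clean_entities (entities : List (List (String × String))) : List (List (String × String)) :=
  (entities.foldl (fun (cleaned : PySem.Dict String (List (String × String))) e =>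
    let text := entText e
    if ["service", "system"].contains (PySem.Str.lower text) then cleaned
    else
      let normalized := PySem.Str.strip (PySem.Str.lower text)
      match cleaned.get? normalized with
      | some cur =>
          if PySem.Str.len text > PySem.Str.len (entText cur) then cleaned.insert normalized e
          else cleaned
      | none => cleaned.insert normalized e)
    PySem.Dict.empty).values

-- ===== PORT B =====
def clean_entities_alt (entities : List (List (String × String))) : List (List (String × String)) :=
  let groups := entities.foldl (fun (groups : PySem.Dict String (List (List (String × String)))) e =>
    let low := PySem.Str.lower (entText e)
    if ["service", "system"].contains low then groups
    else groups.modify (PySem.Str.strip low) [] (· ++ [e]))  -- groups.setdefault(key, []).append(e)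
    PySem.Dict.empty
  -- every stored group is nonempty, so max? is always `some`: filterMap drops nothing (Python max on a nonempty list)
  groups.values.filterMap (fun g => PySem.List.max? g (fun e => PySem.Str.len (entText e)))

-- ===== PRECONDITION & SPEC =====
-- Pre_ excludes exactly the entities without a "text" key, on which Python A raises KeyError.
def Pre_clean_entities (entities : List (List (String × String))) : Prop :=
  (entities.all (fun e => e.any (fun p => p.1 == "text"))) = true
instance (entities : List (List (String × String))) : Decidable (Pre_clean_entities entities) := by unfold Pre_clean_entities; infer_instance
def pvWitness_clean_entities : (List (List (String × String))) :=
  [[("text", "Lambda")], [("text", "lambda service"), ("id", "1")], [("text", "System")]]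
def Spec_clean_entities (entities : List (List (String × String))) (out : List (List (String × String))) : Prop := out = clean_entities_alt entities
instance (entities : List (List (String × String))) (out : List (List (String × String))) : Decidable (Spec_clean_entities entities out) := by unfold Spec_clean_entities; infer_instance

-- ===== CLAIM (what is proved, stated in full; the proofs are below) =====
def Claim_equal_clean_entities : Prop := ∀ (entities : List (List (String × String))), Dom_clean_entities entities → Pre_clean_entities entities → Spec_clean_entities entities (clean_entities entities)

-- ===== LEMMAS AND PROOFS =====

abbrev Ent := List (String × String)

-- B's max key: len(e["text"])
def keyf (e : Ent) : Int := PySem.Str.len (entText e)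

-- the first maximal element of a group (groups are always nonempty)
def best (g : List Ent) : Ent := (PySem.List.max? g keyf).getD []

def Fp (p : String × List Ent) : String × Ent := (p.1, best p.2)

-- the loop bodies of the two ports, as named functions
def stepA (cleaned : PySem.Dict String Ent) (e : Ent) : PySem.Dict String Ent :=
    if ["service", "system"].contains (PySem.Str.lower (entText e)) then cleaned
    else
      match cleaned.get? (PySem.Str.strip (PySem.Str.lower (entText e))) with
      | some cur =>
          if PySem.Str.len (entText e) > PySem.Str.len (entText cur) then
            cleaned.insert (PySem.Str.strip (PySem.Str.lower (entText e))) e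
          else cleaned
      | none => cleaned.insert (PySem.Str.strip (PySem.Str.lower (entText e))) e

def stepB (groups : PySem.Dict String (List Ent)) (e : Ent) : PySem.Dict String (List Ent) :=
    if ["service", "system"].contains (PySem.Str.lower (entText e)) then groups
    else groups.modify (PySem.Str.strip (PySem.Str.lower (entText e))) [] (· ++ [e])

-- loop invariant: A's dict is B's group dict with each group collapsed to its first maximal element
def InvAB (da : PySem.Dict String Ent) (db : PySem.Dict String (List Ent)) : Prop :=
  da.items = db.items.map Fp ∧ db.keys.Nodup ∧ ∀ p ∈ db.items, p.2 ≠ ([] : List Ent)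

theorem max?_append_singleton (g : List Ent) (e : Ent) :
    PySem.List.max? (g ++ [e]) keyf =
      match PySem.List.max? g keyf with
      | none => some e
      | some m => if keyf m < keyf e then some e else some m := by
  unfold PySem.List.max?
  rw [List.foldl_append]
  generalize List.foldl _ none g = o
  cases o <;> simp

theorem invAB_keys {da : PySem.Dict String Ent} {db : PySem.Dict String (List Ent)}
    (h : InvAB da db) : da.keys = db.keys := by
  obtain ⟨h1, _, _⟩ := h
  simp only [PySem.Dict.keys, h1, List.map_map]
  rfl

theorem invAB_step {da : PySem.Dict String Ent} {db : PySem.Dict String (List Ent)}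
    (e : Ent) (h : InvAB da db) : InvAB (stepA da e) (stepB db e) := by
  obtain ⟨hitems, hnd, hne⟩ := h
  have hknd : da.keys.Nodup := by rw [invAB_keys ⟨hitems, hnd, hne⟩]; exact hnd
  unfold stepA stepB
  by_cases hf : ["service", "system"].contains (PySem.Str.lower (entText e)) = true
  · rw [if_pos hf, if_pos hf]; exact ⟨hitems, hnd, hne⟩
  · rw [if_neg hf, if_neg hf]
    set norm := PySem.Str.strip (PySem.Str.lower (entText e)) with hnorm
    by_cases hc : db.contains norm = true
    · -- norm present: there is a group g
      have hmemk : norm ∈ db.keys := (PySem.Dict.contains_iff_mem_keys db norm).1 hc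
      obtain ⟨p, hp, hp1⟩ := List.mem_map.1 hmemk
      obtain ⟨k, g⟩ := p
      simp at hp1; subst hp1
      have hgetb : db.getD norm [] = g := PySem.Dict.getD_of_mem_items db hp hnd []
      have hmema : (norm, best g) ∈ da.items := by
        rw [hitems]; exact List.mem_map.2 ⟨(norm, g), hp, rfl⟩
      have hgeta : da.get? norm = some (best g) :=
        PySem.Dict.get?_of_mem_items da hmema hknd
      have hca : da.contains norm = true := by
        rw [PySem.Dict.contains_eq_isSome_get? da norm, hgeta]; rfl
      have hmod : db.modify norm [] (· ++ [e]) = db.insert norm (g ++ [e]) := by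
        simp [PySem.Dict.modify, hgetb]
      rw [hmod, hgeta]
      have hbne : g ≠ [] := hne _ hp
      have hmaxg : PySem.List.max? g keyf = some (best g) := by
        cases hmg : PySem.List.max? g keyf with
        | none => exact absurd ((PySem.List.max?_eq_none_iff g keyf).1 hmg) hbne
        | some m => simp [best, hmg]
      have hitemsb : (db.insert norm (g ++ [e])).items
          = db.items.map (fun p => if p.1 == norm then (norm, g ++ [e]) else p) :=
        PySem.Dict.items_insert_of_contains db (g ++ [e]) hc
      have hbestapp : best (g ++ [e]) = if keyf (best g) < keyf e then e else best g := by
        unfold best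
        rw [max?_append_singleton, hmaxg]
        by_cases h : keyf (best g) < keyf e <;> simp [h]
      have hval_eq : ∀ q ∈ db.items, q.1 = norm → q.2 = g := by
        intro q hq hq1
        have hmemq : (norm, q.2) ∈ db.items := by rw [← hq1]; simpa using hq
        have h1 : db.get? norm = some q.2 := PySem.Dict.get?_of_mem_items db hmemq hnd
        have h2 : db.get? norm = some g := PySem.Dict.get?_of_mem_items db hp hnd
        rw [h1] at h2; exact Option.some.inj h2
      have hnd' : (db.insert norm (g ++ [e])).keys.Nodup := PySem.Dict.nodup_keys_insert _ _ _ hnd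
      have hne' : ∀ p ∈ (db.insert norm (g ++ [e])).items, p.2 ≠ ([] : List Ent) := by
        intro q hq
        rw [hitemsb] at hq
        obtain ⟨r, hr, hrq⟩ := List.mem_map.1 hq
        by_cases h1 : r.1 == norm
        · simp [h1] at hrq; subst hrq; simp
        · simp [h1] at hrq; subst hrq; exact hne _ hr
      by_cases hlt : PySem.Str.len (entText e) > PySem.Str.len (entText (best g))
      · simp only [hlt, if_true]
        refine ⟨?_, hnd', hne'⟩
        have hitemsa : (da.insert norm e).items
            = da.items.map (fun p => if p.1 == norm then (norm, e) else p) :=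
          PySem.Dict.items_insert_of_contains da e hca
        rw [hitemsa, hitems, hitemsb, List.map_map, List.map_map]
        apply List.map_congr_left
        intro q hq
        by_cases h1 : q.1 == norm
        · simp only [Function.comp_apply, Fp, h1, if_true]
          have : best (g ++ [e]) = e := by
            rw [hbestapp, if_pos]
            simpa [keyf] using hlt
          simp [this]
        · have h1' : q.1 ≠ norm := by simpa using h1
          simp [Function.comp_apply, Fp, h1']
      · simp only [hlt, if_false]
        refine ⟨?_, hnd', hne'⟩
        rw [hitems, hitemsb, List.map_map]
        apply List.map_congr_left
        intro q hq
        by_cases h1 : q.1 == norm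
        · have hq2 : q.2 = g := hval_eq q hq (by simpa using h1)
          simp only [Function.comp_apply, Fp, h1, if_true]
          have : best (g ++ [e]) = best g := by
            rw [hbestapp, if_neg]
            simpa [keyf] using hlt
          simp [this, hq2, (by simpa using h1 : q.1 = norm)]
        · have h1' : q.1 ≠ norm := by simpa using h1
          simp [Function.comp_apply, Fp, h1']
    · -- norm absent in both dicts: both inserts append a fresh entry
      have hcb : db.contains norm = false := by simpa using hc
      have hgetb : db.getD norm [] = [] := PySem.Dict.getD_of_not_contains db [] hcb
      have hca : da.contains norm = false := by
        rw [PySem.Dict.contains_eq_decide_mem_keys da norm, invAB_keys ⟨hitems, hnd, hne⟩,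
          ← PySem.Dict.contains_eq_decide_mem_keys db norm]
        exact hcb
      have hgeta : da.get? norm = none := by
        rw [PySem.Dict.get?_eq_none_iff_contains da norm]
        exact hca
      have hmod : db.modify norm [] (· ++ [e]) = db.insert norm [e] := by
        simp [PySem.Dict.modify, hgetb]
      rw [hmod, hgeta]
      refine ⟨?_, PySem.Dict.nodup_keys_insert _ _ _ hnd, ?_⟩
      · rw [PySem.Dict.items_insert_of_not_contains da e hca,
          PySem.Dict.items_insert_of_not_contains db [e] hcb, List.map_append, hitems]
        rfl
      · intro q hq
        rw [PySem.Dict.items_insert_of_not_contains db [e] hcb] at hq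
        rcases List.mem_append.1 hq with h1 | h1
        · exact hne _ h1
        · simp at h1; subst h1; simp

theorem invAB_foldl (l : List Ent) : ∀ da db, InvAB da db → InvAB (l.foldl stepA da) (l.foldl stepB db) := by
  induction l with
  | nil => intro da db h; exact h
  | cons e t ih => intro da db h; exact ih _ _ (invAB_step e h)

theorem map_best_eq_filterMap (l : List (String × List Ent)) (h : ∀ p ∈ l, p.2 ≠ ([] : List Ent)) :
    l.map (fun p => best p.2) = l.filterMap (fun p => PySem.List.max? p.2 keyf) := by
  induction l with
  | nil => rfl
  | cons p t ih =>
    have hp : p.2 ≠ [] := h p (by simp)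
    have hm' : PySem.List.max? p.2 keyf = some (best p.2) := by
      cases hm : PySem.List.max? p.2 keyf with
      | none => exact absurd ((PySem.List.max?_eq_none_iff p.2 keyf).1 hm) hp
      | some m => simp [best, hm]
    simp [hm', ih (fun q hq => h q (by simp [hq]))]

theorem values_of_inv {da : PySem.Dict String Ent} {db : PySem.Dict String (List Ent)} (h : InvAB da db) :
    da.values = db.values.filterMap (fun g => PySem.List.max? g keyf) := by
  obtain ⟨hitems, hnd, hne⟩ := h
  simp only [PySem.Dict.values, hitems, List.map_map, List.filterMap_map]
  exact map_best_eq_filterMap db.items hne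

theorem empty_inv : InvAB (PySem.Dict.empty : PySem.Dict String Ent) (PySem.Dict.empty : PySem.Dict String (List Ent)) := by
  refine ⟨rfl, ?_, ?_⟩ <;> simp [PySem.Dict.empty, PySem.Dict.keys]

-- ===== VERDICT (by name: the statement is the Claim_ definition above) =====
theorem clean_entities_spec : Claim_equal_clean_entities := by
  intro entities _ _
  show clean_entities entities = clean_entities_alt entities
  show (entities.foldl stepA PySem.Dict.empty).values
      = (entities.foldl stepB PySem.Dict.empty).values.filterMap (fun g => PySem.List.max? g keyf)
  exact values_of_inv (invAB_foldl entities _ _ empty_inv)
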